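-- pv_equiv track=rewrite | github.com/RuiLin-l/Coherent_State_preparation | coherent_preparation_displacement_circuit.py | change_style
-- ===== SOURCE A (Python) =====
-- def string2pauli(str1):
--     '''
--     Convert the string into the form of Pauli matrix
--     example:
--         str1 = "111"
--         return [('I', 'Z'), ('I', 'Z'), ('I', 'Z')]
--     '''
--     list_all = []
--     for i in range(len((str1))):
--         if str1[i] == "1":
--             list_all.append(("I","Z"))
--         elif str1[i] == "2":
--             list_all.append(("X","-iY"))
--         elif str1[i] == "3":
--             list_all.append(("X","iY"))
--         elif str1[i] == "4":
--             list_all.append(("I","-Z"))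
--     return list_all
--
-- def merge(i,j):
--
--     res = []
--     for p in (i,j):
--         if isinstance(p,tuple):
--             res.extend(p)
--         else: res.append(p)
--     return tuple(res)
--
-- def combineN(*args):
--     '''
--     realize tensor product
--     '''
--     target = args[0]
--     for li in args[1:]:
--         tmp = []
--         for i in target:
--             for j in li:
--                 s = "".join((merge(i,j)))
--                 tmp.append(s)
--         target = tmp
--     return target
--
-- def change_style(str1):
--     '''
--     Change the result to the form of minus sign and imaginary number first
--     '''
--     c = string2pauli(str1)
--     sigma2pauli = combineN(*c)
--     list_change_i=[]
--     for i in sigma2pauli: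
--         if i.count("i")>1:
--             if i.count("i")%2 == 0:
--                 i=(int((i.count("i"))/2))*"-"+i
--                 i=i.replace("i","")
--             elif i.count("i")%2 != 0:
--                 i=(int((i.count("i"))/2))*"-"+i
--                 i=i.replace("i","")
--                 i = "i"+i
--         elif i.count("i")==1:
--             i = i.replace("i","")
--             i = "i"+i
--         else:
--             i = i
--         list_change_i.append(i)
--     list_change_symbol=[]
--     for i in list_change_i:
--         if i.count("-") == 1:
--             i=i.replace("-","")
--             i = "-"+i
--         elif i.count("-")>1:
--             if i.count("-")%2 == 0:
--                 i = i.replace("-","")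
--             else:
--                 i = i.replace("-","")
--                 i = "-"+i
--         else:
--             i=i
--         list_change_symbol.append(i)
--     return list_change_symbol
-- ===== SOURCE B (Python) =====
-- def change_style(str1):
--     OPT = {'1': [('I', 0), ('Z', 0)], '2': [('X', 0), ('Y', 3)],
--            '3': [('X', 0), ('Y', 1)], '4': [('I', 0), ('Z', 2)]}
--     pairs = [OPT[c] for c in str1 if c in OPT]
--     terms = pairs[0]
--     for opts in pairs[1:]:
--         terms = [(s + t, (p + q) % 4) for s, p in terms for t, q in opts]
--     return [("", "i", "-", "-i")[p] + s for s, p in terms]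
-- ===== Notes on version B (the rewrite author's own statement) =====
-- stated objective: simpler
-- what changed: Instead of building literal term strings containing imaginary/sign marker characters and then normalizing each term by counting and replacing substrings in two passes, B tracks each factor as a (letter, phase mod 4) pair, sums phases while forming the Cartesian product, and emits each term's sign/imaginary prefix from the total phase by one table lookup.
import Mathlib
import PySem

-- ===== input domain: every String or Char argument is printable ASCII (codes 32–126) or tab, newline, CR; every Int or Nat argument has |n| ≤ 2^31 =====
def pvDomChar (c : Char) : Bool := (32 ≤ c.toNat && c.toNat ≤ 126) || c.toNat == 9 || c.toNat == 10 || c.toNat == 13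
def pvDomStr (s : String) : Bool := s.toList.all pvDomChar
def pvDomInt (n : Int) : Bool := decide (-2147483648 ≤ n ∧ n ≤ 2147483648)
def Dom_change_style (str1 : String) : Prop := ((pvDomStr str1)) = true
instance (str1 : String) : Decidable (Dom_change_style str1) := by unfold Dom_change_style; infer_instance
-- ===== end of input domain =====

-- B replaces A's string-marker counting/replace normalization by tracking (letters, phase mod 4)
-- pairs during the tensor product and emitting the prefix by one table lookup; objective: simpler.

-- ===== PORT A =====
-- strings are handled as List Char (the PySem.Chars representation) and packed with String.ofList at the end
def pauliA (cs : List Char) : List (List Char × List Char) :=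
  cs.foldl (fun acc c =>
    if c = '1' then acc ++ [(['I'], ['Z'])]
    else if c = '2' then acc ++ [(['X'], ['-','i','Y'])]
    else if c = '3' then acc ++ [(['X'], ['i','Y'])]
    else if c = '4' then acc ++ [(['I'], ['-','Z'])]
    else acc) []

-- combineN(*c): target = c[0]; Python raises IndexError on empty c (excluded by Pre_)
def combineNA (ps : List (List Char × List Char)) : List (List Char) :=
  match ps with
  | [] => []
  | p :: rest =>
    rest.foldl (fun tgt q => tgt.flatMap (fun s => [s ++ q.1, s ++ q.2])) [p.1, p.2]

-- first normalization loop body ('i' handling); int(count/2) is exact Nat halving here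
def normI_A (s : List Char) : List Char :=
  let k := PySem.Chars.count s ['i']
  if k > 1 then
    if k % 2 = 0 then PySem.Chars.replace (List.replicate (k / 2) '-' ++ s) ['i'] []
    else 'i' :: PySem.Chars.replace (List.replicate (k / 2) '-' ++ s) ['i'] []
  else if k = 1 then 'i' :: PySem.Chars.replace s ['i'] []
  else s

-- second normalization loop body ('-' handling)
def normS_A (s : List Char) : List Char :=
  let m := PySem.Chars.count s ['-']
  if m = 1 then '-' :: PySem.Chars.replace s ['-'] []
  else if m > 1 then
    if m % 2 = 0 then PySem.Chars.replace s ['-'] []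
    else '-' :: PySem.Chars.replace s ['-'] []
  else s

def change_style (str1 : String) : List String :=
  let c := pauliA str1.toList
  let sigma2pauli := combineNA c
  let list_change_i := sigma2pauli.map normI_A
  let list_change_symbol := list_change_i.map normS_A
  list_change_symbol.map String.ofList

-- ===== PORT B =====
def optB (c : Char) : Option (List (List Char × Nat)) :=
  if c = '1' then some [(['I'], 0), (['Z'], 0)]
  else if c = '2' then some [(['X'], 0), (['Y'], 3)]
  else if c = '3' then some [(['X'], 0), (['Y'], 1)]
  else if c = '4' then some [(['I'], 0), (['Z'], 2)]
  else none

-- ("", "i", "-", "-i")[p]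
def prefixB (p : Nat) : List Char :=
  if p = 1 then ['i'] else if p = 2 then ['-'] else if p = 3 then ['-','i'] else []

def change_style_alt (str1 : String) : List String :=
  let pairs := str1.toList.filterMap optB
  match pairs with
  | [] => []   -- Python B raises IndexError here (pairs[0]); excluded by Pre_
  | first :: rest =>
    let terms := rest.foldl
      (fun ts opts => ts.flatMap (fun sp => opts.map (fun tq => (sp.1 ++ tq.1, (sp.2 + tq.2) % 4)))) first
    terms.map (fun sp => String.ofList (prefixB sp.2 ++ sp.1))

-- ===== PRECONDITION & SPEC =====
-- Pre_ excludes inputs with no character in '1234': there both Pythons raise IndexError (args[0] / pairs[0]).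
def Pre_change_style (str1 : String) : Prop :=
  (str1.toList.any fun c => c == '1' || c == '2' || c == '3' || c == '4') = true
instance (str1 : String) : Decidable (Pre_change_style str1) := by unfold Pre_change_style; infer_instance
def pvWitness_change_style : String := "1234"

def Spec_change_style (str1 : String) (out : List String) : Prop := out = change_style_alt str1
instance (str1 : String) (out : List String) : Decidable (Spec_change_style str1 out) := by
  unfold Spec_change_style; infer_instance

-- ===== CLAIM (what is proved, stated in full; the proofs are below) =====
def Claim_equal_change_style : Prop :=
  ∀ (str1 : String), Dom_change_style str1 → Pre_change_style str1 →
    Spec_change_style str1 (change_style str1)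

-- ===== LEMMAS AND PROOFS =====

-- the per-character table of A, as a filterMap function
def optA (c : Char) : Option (List Char × List Char) :=
  if c = '1' then some (['I'], ['Z'])
  else if c = '2' then some (['X'], ['-','i','Y'])
  else if c = '3' then some (['X'], ['i','Y'])
  else if c = '4' then some (['I'], ['-','Z'])
  else none

-- abstraction: letters (markers stripped) and phase mod 4 of an A-side term string
def fA (s : List Char) : List Char × Nat :=
  ((s.filter (· != 'i')).filter (· != '-'), (s.count 'i' + 2 * s.count '-') % 4)

lemma pauliA_body (acc : List (List Char × List Char)) (c : Char) :
    (if c = '1' then acc ++ [(['I'], ['Z'])]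
     else if c = '2' then acc ++ [(['X'], ['-','i','Y'])]
     else if c = '3' then acc ++ [(['X'], ['i','Y'])]
     else if c = '4' then acc ++ [(['I'], ['-','Z'])]
     else acc) = acc ++ (optA c).toList := by
  unfold optA; split_ifs <;> simp

lemma pauliA_eq (cs : List Char) : pauliA cs = cs.filterMap optA := by
  unfold pauliA
  simp only [pauliA_body]
  suffices h : ∀ acc, cs.foldl (fun acc c => acc ++ (optA c).toList) acc
      = acc ++ cs.filterMap optA by simpa using h []
  induction cs with
  | nil => simp
  | cons c cs ih =>
    intro acc
    rw [List.foldl_cons, ih, List.filterMap_cons]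
    cases optA c <;> simp

lemma optB_eq (c : Char) :
    optB c = (optA c).map (fun p => [fA p.1, fA p.2]) := by
  unfold optA optB; split_ifs <;> rfl

lemma fA_append (s t : List Char) :
    fA (s ++ t) = ((fA s).1 ++ (fA t).1, ((fA s).2 + (fA t).2) % 4) := by
  unfold fA
  simp only [List.filter_append, List.count_append]
  congr 1
  omega

-- single-character count is character count
lemma count_go_single (c : Char) :
    ∀ (cs : List Char) (fuel acc : Nat), cs.length ≤ fuel →
      PySem.Chars.count.go [c] fuel cs acc = acc + cs.count c := by
  intro cs
  induction cs with
  | nil => intro fuel acc _; cases fuel <;> simp [PySem.Chars.count.go]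
  | cons h t ih =>
    intro fuel acc hf
    cases fuel with
    | zero => simp at hf
    | succ n =>
      simp only [PySem.Chars.count.go, List.isPrefixOf, Bool.and_true,
        List.length_cons, List.length_nil, List.drop_succ_cons, List.drop_zero]
      split_ifs with hp
      · rw [ih n (acc + 1) (by simp at hf; omega)]
        have hc : c = h := beq_iff_eq.mp hp
        subst hc
        simp
        omega
      · rw [ih n acc (by simp at hf; omega)]
        have hc : c ≠ h := by simpa using hp
        simp [Ne.symm hc]

lemma count_single (s : List Char) (c : Char) :
    PySem.Chars.count s [c] = s.count c := by
  unfold PySem.Chars.count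
  simpa using count_go_single c s s.length 0 le_rfl

-- single-character replace by "" is filter
lemma replace_go_single (c : Char) :
    ∀ (cs : List Char) (fuel : Nat) (acc : List Char), cs.length ≤ fuel →
      PySem.Chars.replace.go [c] [] fuel cs acc = acc.reverse ++ cs.filter (· != c) := by
  intro cs
  induction cs with
  | nil => intro fuel acc _; cases fuel <;> simp [PySem.Chars.replace.go]
  | cons h t ih =>
    intro fuel acc hf
    cases fuel with
    | zero => simp at hf
    | succ n =>
      simp only [PySem.Chars.replace.go, List.isPrefixOf, Bool.and_true,
        List.length_cons, List.length_nil, List.drop_succ_cons, List.drop_zero,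
        List.reverse_nil, List.nil_append]
      split_ifs with hp
      · rw [ih n acc (by simp at hf; omega)]
        have hc : c = h := beq_iff_eq.mp hp
        subst hc
        simp
      · rw [ih n (h :: acc) (by simp at hf; omega)]
        have hc : c ≠ h := by simpa using hp
        simp [Ne.symm hc]

lemma replace_single (s : List Char) (c : Char) :
    PySem.Chars.replace s [c] [] = s.filter (· != c) := by
  unfold PySem.Chars.replace
  simpa using replace_go_single c s s.length [] le_rfl

lemma filter_eq_of_count_zero {s : List Char} {c : Char} (h : s.count c = 0) :
    s.filter (· != c) = s := by
  rw [List.filter_eq_self]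
  intro a ha
  simp only [bne_iff_ne, ne_eq]
  intro hac; subst hac
  exact absurd (List.count_eq_zero.mp h) (fun hn => hn ha)

lemma normI_eq (s : List Char) :
    normI_A s = (if s.count 'i' % 2 = 1 then ['i'] else []) ++
      List.replicate (s.count 'i' / 2) '-' ++ s.filter (· != 'i') := by
  unfold normI_A
  rw [count_single]
  by_cases h1 : s.count 'i' > 1
  · rw [if_pos h1, replace_single, List.filter_append]
    have hrep : (List.replicate (s.count 'i' / 2) '-').filter (· != 'i') =
        List.replicate (s.count 'i' / 2) '-' := by
      rw [List.filter_eq_self]; intro a ha; simp [List.eq_of_mem_replicate ha]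
    rw [hrep]
    by_cases h2 : s.count 'i' % 2 = 0
    · rw [if_pos h2, if_neg (by omega)]; simp
    · rw [if_neg h2, if_pos (by omega)]; simp
  · rw [if_neg h1]
    by_cases h2 : s.count 'i' = 1
    · rw [if_pos h2, replace_single, h2]; simp
    · have h0 : s.count 'i' = 0 := by omega
      rw [if_neg h2, h0]
      simp [filter_eq_of_count_zero h0]

lemma normS_eq (s : List Char) :
    normS_A s = (if s.count '-' % 2 = 1 then ['-'] else []) ++ s.filter (· != '-') := by
  unfold normS_A
  rw [count_single]
  by_cases h1 : s.count '-' = 1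
  · rw [if_pos h1, replace_single, h1]; simp
  · rw [if_neg h1]
    by_cases h2 : s.count '-' > 1
    · rw [if_pos h2, replace_single]
      by_cases h3 : s.count '-' % 2 = 0
      · rw [if_pos h3, if_neg (by omega)]; simp
      · rw [if_neg h3, if_pos (by omega)]; simp
    · have h0 : s.count '-' = 0 := by omega
      rw [if_neg h2, h0]
      simp [filter_eq_of_count_zero h0]

lemma prefixB_arith (k m : Nat) :
    prefixB ((k + 2 * m) % 4) =
      (if (k / 2 + m) % 2 = 1 then ['-'] else []) ++ (if k % 2 = 1 then ['i'] else []) := by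
  have hb : k % 2 = 0 ∨ k % 2 = 1 := by omega
  have he : (k / 2 + m) % 2 = 0 ∨ (k / 2 + m) % 2 = 1 := by omega
  have hk : (k + 2 * m) % 4 = k % 2 + 2 * ((k / 2 + m) % 2) := by omega
  rw [hk]
  rcases hb with hb | hb <;> rcases he with he | he <;> rw [hb, he] <;> rfl

-- per-term: A's two normalization passes equal B's prefix-of-phase formatting
lemma norm_full (s : List Char) :
    normS_A (normI_A s) = prefixB (fA s).2 ++ (fA s).1 := by
  rw [normI_eq, normS_eq]
  set k := s.count 'i' with hk
  set m := s.count '-' with hm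
  have hcount : ((if k % 2 = 1 then ['i'] else []) ++
      List.replicate (k / 2) '-' ++ s.filter (· != 'i')).count '-' = k / 2 + m := by
    simp only [List.count_append]
    have h1 : (if k % 2 = 1 then ['i'] else []).count '-' = 0 := by
      split_ifs <;> simp
    have h2 : (List.replicate (k / 2) '-').count '-' = k / 2 := by simp
    have h3 : (s.filter (· != 'i')).count '-' = m := by
      rw [hm, List.count_filter]; simp
    omega
  have hfilt : ((if k % 2 = 1 then ['i'] else []) ++
      List.replicate (k / 2) '-' ++ s.filter (· != 'i')).filter (· != '-') =
      (if k % 2 = 1 then ['i'] else []) ++ (s.filter (· != 'i')).filter (· != '-') := by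
    simp only [List.filter_append]
    have h1 : (if k % 2 = 1 then ['i'] else []).filter (· != '-') =
        (if k % 2 = 1 then ['i'] else []) := by split_ifs <;> rfl
    have h2 : (List.replicate (k / 2) '-').filter (· != '-') = [] := by
      rw [List.filter_eq_nil_iff]; intro a ha; simp [List.eq_of_mem_replicate ha]
    rw [h1, h2]; simp
  rw [hcount, hfilt]
  unfold fA
  rw [← hk, ← hm, prefixB_arith]
  simp [List.append_assoc]

-- the tensor-product folds correspond under fA
lemma fold_inv (rest : List (List Char × List Char)) :
    ∀ (tgt : List (List Char)),
      (rest.map (fun p => [fA p.1, fA p.2])).foldl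
        (fun ts opts => ts.flatMap (fun sp => opts.map (fun tq => (sp.1 ++ tq.1, (sp.2 + tq.2) % 4))))
        (tgt.map fA)
      = (rest.foldl (fun tgt q => tgt.flatMap (fun s => [s ++ q.1, s ++ q.2])) tgt).map fA := by
  induction rest with
  | nil => intro tgt; simp
  | cons q rest ih =>
    intro tgt
    simp only [List.map_cons, List.foldl_cons]
    rw [← ih]
    congr 1
    rw [List.map_flatMap, List.flatMap_map]
    apply List.flatMap_congr  -- pointwise
    intro s _
    simp [fA_append]

-- ===== VERDICT (by name: the statement is the Claim_ definition above) =====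
theorem change_style_spec : Claim_equal_change_style := by
  intro str1 _ _
  unfold Spec_change_style change_style change_style_alt
  rw [pauliA_eq]
  have hmap : str1.toList.filterMap optB =
      (str1.toList.filterMap optA).map (fun p => [fA p.1, fA p.2]) := by
    rw [List.map_filterMap]
    apply List.filterMap_congr
    intro c _
    exact optB_eq c
  rw [hmap]
  cases hc : str1.toList.filterMap optA with
  | nil => simp [combineNA]
  | cons p rest =>
    simp only [List.map_cons, combineNA]
    have : ([fA p.1, fA p.2] : List (List Char × Nat)) = ([p.1, p.2]).map fA := by simp
    rw [this, fold_inv]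
    simp only [List.map_map]
    apply List.map_congr_left
    intro s _
    simp [Function.comp, norm_full]
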